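-- pv_equiv track=rewrite | github.com/HICE-CodingTestStudy/our-code | stack/yoona/주식가격.py | solution
-- ===== SOURCE A (Python) =====
-- def solution(prices):
--     answer = [i for i in range(len(prices) - 1, -1, -1)]
--
--     stack = []
--     for i in range(len(prices)):
--         while stack and prices[stack[-1]] > prices[i]:
--             j = stack.pop()
--             answer[j] = i - j
--         stack.append(i)
--
--     return answer
-- ===== SOURCE B (Python) =====
-- def solution(prices):
--     answer = []
--     for i, p in enumerate(prices):
--         count = 0
--         for q in prices[i + 1:]:
--             count += 1
--             if q < p:
--                 break
--         answer.append(count)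
--     return answer
-- ===== Notes on version B (the rewrite author's own statement) =====
-- stated objective: simpler
-- what changed: Replaced the monotonic index stack with in-place answer updates by a direct per-index forward scan that counts steps until the first strictly smaller later price.
import Mathlib
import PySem

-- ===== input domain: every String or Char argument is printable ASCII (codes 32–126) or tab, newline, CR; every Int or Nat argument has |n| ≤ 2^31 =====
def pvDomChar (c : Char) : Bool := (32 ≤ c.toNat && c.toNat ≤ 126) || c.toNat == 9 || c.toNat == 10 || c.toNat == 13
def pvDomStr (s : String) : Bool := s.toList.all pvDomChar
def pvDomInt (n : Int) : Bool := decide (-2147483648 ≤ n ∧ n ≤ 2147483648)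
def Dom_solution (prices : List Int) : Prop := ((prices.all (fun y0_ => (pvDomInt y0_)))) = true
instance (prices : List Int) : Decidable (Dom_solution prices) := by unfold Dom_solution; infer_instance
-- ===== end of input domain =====

-- B replaces A's monotonic index stack with a direct per-index forward scan (simpler, no index bookkeeping).

-- ===== PORT A =====
-- the inner `while stack and prices[stack[-1]] > prices[i]` loop;
-- the Python list `stack` is modelled with its top (stack[-1]) as the HEAD of the Lean list
def popA (prices : List Int) (i : Nat) : List Nat → List Int → List Nat × List Int
  | [], ans => ([], ans)
  | j :: st, ans =>
    if prices.getD i 0 < prices.getD j 0 then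
      popA prices i st (ans.set j ((i : Int) - (j : Int)))
    else (j :: st, ans)

-- body of `for i in range(len(prices))`
def stepA (prices : List Int) (sa : List Nat × List Int) (i : Nat) : List Nat × List Int :=
  let r := popA prices i sa.1 sa.2
  (i :: r.1, r.2)

def solution (prices : List Int) : List Int :=
  -- answer = [n-1, n-2, ..., 0]
  let answer : List Int := (List.range prices.length).reverse.map (fun k => Int.ofNat k)
  ((List.range prices.length).foldl (stepA prices) ([], answer)).2

-- ===== PORT B =====
-- the inner loop: count += 1 each step, break at the first q < p
def countB (p : Int) : List Int → Int
  | [] => 0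
  | q :: rest => if q < p then 1 else 1 + countB p rest

-- for each element p, scan the suffix after it
def solution_alt : List Int → List Int
  | [] => []
  | p :: rest => countB p rest :: solution_alt rest

-- ===== PRECONDITION & SPEC =====
def Spec_solution (prices : List Int) (out : List Int) : Prop := out = solution_alt prices
instance (prices : List Int) (out : List Int) : Decidable (Spec_solution prices out) := by unfold Spec_solution; infer_instance

-- ===== CLAIM (what is proved, stated in full; the proofs are below) =====
def Claim_equal_solution : Prop := ∀ (prices : List Int), Dom_solution prices → Spec_solution prices (solution prices)

-- ===== LEMMAS AND PROOFS =====

-- B computes, at each index j, countB over the suffix after j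
theorem alt_eq (prices : List Int) :
    solution_alt prices =
      (List.range prices.length).map
        (fun j => countB (prices.getD j 0) (prices.drop (j + 1))) := by
  induction prices with
  | nil => simp [solution_alt]
  | cons p rest ih =>
    simp only [solution_alt, List.length_cons, List.range_succ_eq_map, List.map_cons,
      List.map_map]
    congr 1

theorem countB_all (p : Int) (l : List Int)
    (h : ∀ t (ht : t < l.length), ¬ l[t] < p) : countB p l = (l.length : Int) := by
  induction l with
  | nil => simp [countB]
  | cons q rest ih =>
    have h0 : ¬ q < p := by simpa using h 0 (by simp)
    have := ih (fun t ht => by simpa using h (t + 1) (by simpa using ht))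
    simp [countB, h0, this]
    ring

theorem countB_firstAt (p : Int) (l : List Int) : ∀ (d : Nat) (hd : d < l.length),
    (∀ t, t < d → ∀ (ht : t < l.length), ¬ l[t] < p) → l[d] < p →
    countB p l = (d : Int) + 1 := by
  induction l with
  | nil => intro d hd; simp at hd
  | cons q rest ih =>
    intro d hd hb hdrop
    cases d with
    | zero => simp at hdrop; simp [countB, hdrop]
    | succ d =>
      have h0 : ¬ q < p := by simpa using hb 0 (by omega) (by simp)
      have := ih d (by simpa using hd)
        (fun t ht ht' => by simpa using hb (t + 1) (by omega) (by simpa using ht'))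
        (by simpa using hdrop)
      simp [countB, h0, this]
      ring

-- the value B writes at j when no later price is strictly smaller
theorem spec_noDrop (prices : List Int) (j : Nat) (hj : j < prices.length)
    (h : ∀ m, j < m → m < prices.length → ¬ prices.getD m 0 < prices.getD j 0) :
    countB (prices.getD j 0) (prices.drop (j + 1)) = (prices.length : Int) - 1 - j := by
  have := countB_all (prices.getD j 0) (prices.drop (j + 1)) (by
    intro t ht
    rw [List.getElem_drop, List.getD_eq_getElem prices 0 hj]
    have hm : j + 1 + t < prices.length := by
      simp [List.length_drop] at ht; omega
    have h2 := h (j + 1 + t) (by omega) hm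
    rwa [List.getD_eq_getElem prices 0 hm, List.getD_eq_getElem prices 0 hj] at h2)
  rw [this]
  simp [List.length_drop]
  omega

-- the value B writes at j when the first strictly smaller later price is at k
theorem spec_dropAt (prices : List Int) (j k : Nat) (hjk : j < k) (hk : k < prices.length)
    (hdrop : prices.getD k 0 < prices.getD j 0)
    (h : ∀ m, j < m → m < k → ¬ prices.getD m 0 < prices.getD j 0) :
    countB (prices.getD j 0) (prices.drop (j + 1)) = (k : Int) - j := by
  have hj : j < prices.length := by omega
  have hlen : k - j - 1 < (prices.drop (j + 1)).length := by
    simp [List.length_drop]; omega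
  have := countB_firstAt (prices.getD j 0) (prices.drop (j + 1)) (k - j - 1) hlen
    (by
      intro t ht ht'
      rw [List.getElem_drop, List.getD_eq_getElem prices 0 hj]
      have hm : j + 1 + t < prices.length := by omega
      have h2 := h (j + 1 + t) (by omega) (by omega)
      rwa [List.getD_eq_getElem prices 0 hm, List.getD_eq_getElem prices 0 hj] at h2)
    (by
      rw [List.getElem_drop, List.getD_eq_getElem prices 0 hj]
      have hkey : j + 1 + (k - j - 1) = k := by omega
      simp only [hkey]
      rw [List.getD_eq_getElem prices 0 hk, List.getD_eq_getElem prices 0 hj] at hdrop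
      exact hdrop)
  rw [this]
  omega

-- the fold invariant: after processing indices 0..k-1, indices off the stack hold B's value,
-- indices on the stack (or unprocessed) still hold the initial value n-1-j, the stack is
-- decreasing with non-increasing prices toward the bottom, and no stack index has seen a drop
def InvA (prices : List Int) (k : Nat) (st : List Nat) (ans : List Int) : Prop :=
  ans.length = prices.length ∧
  (∀ j ∈ st, j < k) ∧
  st.Pairwise (fun a b => b < a ∧ prices.getD b 0 ≤ prices.getD a 0) ∧
  (∀ j ∈ st, ∀ m, j < m → m < k → ¬ prices.getD m 0 < prices.getD j 0) ∧
  (∀ j, j < k → j ∉ st → ans.getD j 0 = countB (prices.getD j 0) (prices.drop (j + 1))) ∧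
  (∀ j, j < prices.length → (k ≤ j ∨ j ∈ st) →
    ans.getD j 0 = (prices.length : Int) - 1 - j)

theorem getD_set_self (l : List Int) (i : Nat) (v : Int) (h : i < l.length) :
    (l.set i v).getD i 0 = v := by
  rw [List.getD_eq_getElem _ 0 (by simpa using h)]
  simp

theorem getD_set_ne (l : List Int) (i j : Nat) (v : Int) (h : i ≠ j) :
    (l.set i v).getD j 0 = l.getD j 0 := by
  simp [List.getD_eq_getElem?_getD, List.getElem?_set_ne h]

theorem popA_inv (prices : List Int) (k : Nat) (hk : k < prices.length) :
    ∀ st ans, InvA prices k st ans →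
      InvA prices (k + 1) (k :: (popA prices k st ans).1) (popA prices k st ans).2 := by
  intro st
  induction st with
  | nil =>
    intro ans ⟨hlen, _, _, _, hdone, hinit⟩
    have hred : popA prices k [] ans = ([], ans) := by unfold popA; rfl
    rw [hred]
    refine ⟨hlen, ?_, ?_, ?_, ?_, ?_⟩
    · intro a ha
      rcases List.mem_cons.mp ha with rfl | ha
      · omega
      · simp at ha
    · simp
    · intro a ha m hm hm'
      rcases List.mem_cons.mp ha with rfl | ha
      · omega
      · simp at ha
    · intro j hj hjmem
      have hne : j ≠ k := fun h => hjmem (by simp [h])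
      exact hdone j (by omega) (by simp)
    · intro j hj hcase
      refine hinit j hj (Or.inl ?_)
      rcases hcase with h | h
      · omega
      · rcases List.mem_cons.mp h with rfl | h
        · omega
        · simp at h
  | cons j st ih =>
    intro ans ⟨hlen, hmem, hpw, hnd, hdone, hinit⟩
    have hjk : j < k := hmem j (by simp)
    have hjn : j < prices.length := by omega
    by_cases hc : prices.getD k 0 < prices.getD j 0
    · -- j is popped, its final answer k - j is written
      have hred0 : popA prices k (j :: st) ans
          = if prices.getD k 0 < prices.getD j 0
            then popA prices k st (ans.set j ((k : Int) - (j : Int)))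
            else (j :: st, ans) := rfl
      have hred : popA prices k (j :: st) ans
          = popA prices k st (ans.set j ((k : Int) - (j : Int))) := by
        rw [hred0, if_pos hc]
      have hjnotst : j ∉ st := by
        intro hmem'
        exact absurd ((List.pairwise_cons.mp hpw).1 j hmem').1 (by omega)
      have hspec : countB (prices.getD j 0) (prices.drop (j + 1)) = (k : Int) - j :=
        spec_dropAt prices j k hjk hk hc (hnd j (by simp))
      have hinv' : InvA prices k st (ans.set j ((k : Int) - (j : Int))) := by
        refine ⟨by simpa using hlen, fun a ha => hmem a (by simp [ha]),
          (List.pairwise_cons.mp hpw).2, fun a ha => hnd a (by simp [ha]), ?_, ?_⟩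
        · intro j' hj' hj'st
          by_cases hjj : j' = j
          · subst hjj
            rw [getD_set_self ans j' _ (by omega)]
            exact hspec.symm
          · rw [getD_set_ne ans j j' _ (fun h => hjj h.symm)]
            refine hdone j' hj' (fun hmem' => ?_)
            rcases List.mem_cons.mp hmem' with rfl | h
            · exact hjj rfl
            · exact hj'st h
        · intro j' hj' hcase
          have hjj : j' ≠ j := by
            rcases hcase with h | h
            · omega
            · intro he; subst he; exact hjnotst h
          rw [getD_set_ne ans j j' _ (fun h => hjj h.symm)]
          refine hinit j' hj' ?_
          rcases hcase with h | h
          · exact Or.inl h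
          · exact Or.inr (by simp [h])
      rw [hred]
      exact ih _ hinv'
    · -- pop loop stops; k is pushed on top of j :: st
      have hred0 : popA prices k (j :: st) ans
          = if prices.getD k 0 < prices.getD j 0
            then popA prices k st (ans.set j ((k : Int) - (j : Int)))
            else (j :: st, ans) := rfl
      have hred : popA prices k (j :: st) ans = (j :: st, ans) := by
        rw [hred0, if_neg hc]
      rw [hred]
      show InvA prices (k + 1) (k :: j :: st) ans
      have hble : ∀ b ∈ j :: st, prices.getD b 0 ≤ prices.getD k 0 := by
        intro b hb
        rcases List.mem_cons.mp hb with rfl | hb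
        · omega
        · have := ((List.pairwise_cons.mp hpw).1 b hb).2
          omega
      refine ⟨hlen, ?_, ?_, ?_, ?_, ?_⟩
      · intro a ha
        rcases List.mem_cons.mp ha with rfl | ha
        · omega
        · have := hmem a ha; omega
      · refine List.pairwise_cons.mpr ⟨?_, hpw⟩
        intro b hb
        exact ⟨hmem b hb, hble b hb⟩
      · intro a ha m hm hm'
        rcases List.mem_cons.mp ha with rfl | ha
        · omega
        · by_cases hmk : m = k
          · have h1 := hble a ha
            rw [hmk]
            omega
          · exact hnd a ha m hm (by omega)
      · intro j' hj' hj'st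
        have h1 : j' ≠ k := fun h => hj'st (by simp [h])
        refine hdone j' (by omega) (fun h => hj'st (by simp [h]))
      · intro j' hj' hcase
        refine hinit j' hj' ?_
        rcases hcase with h | h
        · exact Or.inl (by omega)
        · rcases List.mem_cons.mp h with rfl | h
          · exact Or.inl (by omega)
          · exact Or.inr h

theorem fold_inv (prices : List Int) : ∀ k, k ≤ prices.length →
    InvA prices k
      (((List.range k).foldl (stepA prices)
        ([], (List.range prices.length).reverse.map (fun k => Int.ofNat k))).1)
      (((List.range k).foldl (stepA prices)
        ([], (List.range prices.length).reverse.map (fun k => Int.ofNat k))).2) := by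
  intro k
  induction k with
  | zero =>
    intro _
    simp only [List.range_zero, List.foldl_nil]
    refine ⟨by simp, by simp, by simp, by simp, by simp, ?_⟩
    intro j hj _
    rw [List.getD_eq_getElem _ 0 (by simpa using hj)]
    simp only [List.getElem_map]
    rw [List.getElem_reverse]
    simp only [List.getElem_range, List.length_range, Int.ofNat_eq_natCast]
    omega
  | succ k ih =>
    intro hk
    have := popA_inv prices k (by omega) _ _ (ih (by omega))
    simpa [List.range_succ, stepA] using this

theorem solution_eq (prices : List Int) : solution prices = solution_alt prices := by
  obtain ⟨hlen, _, _, hnd, hdone, hinit⟩ := fold_inv prices prices.length le_rfl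
  rw [alt_eq]
  unfold solution
  apply List.ext_getElem
  · simpa using hlen
  intro j hj hj'
  have hjn : j < prices.length := by simpa using hj'
  have key : (((List.range prices.length).foldl (stepA prices)
      ([], (List.range prices.length).reverse.map (fun k => Int.ofNat k))).2).getD j 0 =
      countB (prices.getD j 0) (prices.drop (j + 1)) := by
    by_cases hst : j ∈ ((List.range prices.length).foldl (stepA prices)
        ([], (List.range prices.length).reverse.map (fun k => Int.ofNat k))).1
    · rw [hinit j hjn (Or.inr hst), spec_noDrop prices j hjn (hnd j hst)]
    · exact hdone j hjn hst
  rw [List.getD_eq_getElem _ 0 (by omega)] at key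
  simpa using key

-- ===== VERDICT (by name: the statement is the Claim_ definition above) =====
theorem solution_spec : Claim_equal_solution := by
  intro prices _
  exact solution_eq prices
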